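-- pv_equiv track=rewrite | github.com/nuspy/AI_FX_Station | src/forex_diffusion/backtest/config_builder.py | expand_indicator_timeframes
-- ===== SOURCE A (Python) =====
-- from itertools import product
-- from typing import Any, Dict, Iterable, List, Tuple
--
-- def expand_indicator_timeframes(selection: Dict[str, List[str]]) -> List[Dict[str, List[str]]]:
--     if not selection:
--         return [{}]
--     cleaned: Dict[str, List[str]] = {}
--     for ind, tfs in selection.items():
--         norm = []
--         for tf in tfs:
--             tf = str(tf).strip()
--             if tf and tf not in norm:
--                 norm.append(tf)
--         if norm:
--             cleaned[ind] = norm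
--     if not cleaned:
--         return [{}]
--     combos: List[Dict[str, List[str]]] = []
--     combos.append(cleaned)
--     per_indicator = []
--     for ind, tfs in cleaned.items():
--         per_indicator.append([(ind, [tf]) for tf in tfs])
--     for variant in product(*per_indicator):
--         combo = {ind: tfs for ind, tfs in variant}
--         combos.append(combo)
--     unique: Dict[Tuple[Tuple[str, Tuple[str, ...]], ...], Dict[str, List[str]]] = {}
--     for combo in combos:
--         key = tuple(sorted((k, tuple(v)) for k, v in combo.items()))
--         unique[key] = combo
--     return list(unique.values())
-- ===== SOURCE B (Python) =====
-- def _assignments(items):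
--     if not items:
--         return [[]]
--     (ind, tfs), rest = items[0], _assignments(items[1:])
--     return [[(ind, [tf])] + tail for tf in tfs for tail in rest]
--
--
-- def expand_indicator_timeframes(selection):
--     cleaned = []
--     for ind, tfs in selection.items():
--         norm = list(dict.fromkeys(t for t in (str(tf).strip() for tf in tfs) if t))
--         if norm:
--             cleaned.append((ind, norm))
--     if not cleaned:
--         return [{}]
--     result = [dict(cleaned)]
--     if any(len(tfs) > 1 for _, tfs in cleaned):
--         result.extend(dict(a) for a in _assignments(cleaned))
--     return result
-- ===== Notes on version B (the rewrite author's own statement) =====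
-- stated objective: alternative
-- what changed: Replaces itertools.product plus the sorted-tuple-key dedup dict with a recursive enumeration of assignments that is emitted only when some indicator has more than one timeframe, so no dedup pass is needed at all (the duplicate of `cleaned` arises exactly when every indicator has a single timeframe); normalization uses dict.fromkeys over a stripped/filtered generator.
import Mathlib
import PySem

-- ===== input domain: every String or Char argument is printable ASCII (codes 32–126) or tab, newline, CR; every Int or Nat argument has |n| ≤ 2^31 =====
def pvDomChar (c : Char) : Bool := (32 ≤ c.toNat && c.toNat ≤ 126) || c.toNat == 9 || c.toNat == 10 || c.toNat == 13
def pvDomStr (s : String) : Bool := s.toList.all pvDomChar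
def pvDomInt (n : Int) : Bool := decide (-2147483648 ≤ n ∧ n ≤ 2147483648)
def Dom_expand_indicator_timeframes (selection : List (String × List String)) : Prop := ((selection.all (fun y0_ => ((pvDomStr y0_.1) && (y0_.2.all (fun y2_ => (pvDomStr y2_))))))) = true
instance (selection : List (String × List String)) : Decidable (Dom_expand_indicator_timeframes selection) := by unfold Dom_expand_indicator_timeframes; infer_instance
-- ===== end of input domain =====

-- B replaces itertools.product + the sorted-tuple-key dedup dict with a recursive enumeration that is
-- emitted only when some indicator has more than one timeframe, so no dedup pass is needed (objective: alternative).

-- ===== PORT A =====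
-- the inner normalization loop of A (tf = str(tf).strip(); if tf and tf not in norm: norm.append(tf))
def pvNormA (tfs : List String) : List String :=
  tfs.foldl (fun norm tf =>
    if PySem.Str.strip tf ≠ "" ∧ PySem.Str.strip tf ∉ norm
    then norm ++ [PySem.Str.strip tf] else norm) []

-- key = tuple(sorted((k, tuple(v)) for k, v in combo.items()))
def pvKey (c : List (String × List String)) : List (String × List String) :=
  PySem.List.sorted2 c Prod.fst Prod.snd false

def expand_indicator_timeframes (selection : List (String × List String)) : List (List (String × List String)) :=
  if selection = [] then [[]] else
  let cleaned : PySem.Dict String (List String) :=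
    selection.foldl (fun d p =>
      if pvNormA p.2 ≠ [] then d.insert p.1 (pvNormA p.2) else d) PySem.Dict.empty
  if cleaned.items = [] then [[]] else
  let combos0 : List (List (String × List String)) := [cleaned.items]
  let per_indicator := cleaned.items.map (fun p => p.2.map (fun tf => (p.1, ([tf] : List String))))
  let variants := per_indicator.foldl
    (fun acc pool => acc.flatMap (fun v => pool.map (fun c => v ++ [c]))) [[]]
  let combos := variants.foldl (fun cs v =>
    cs ++ [(v.foldl (fun d c => d.insert c.1 c.2)
             (PySem.Dict.empty : PySem.Dict String (List String))).items]) combos0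
  let uniq := combos.foldl (fun u c => u.insert (pvKey c) c)
    (PySem.Dict.empty : PySem.Dict (List (String × List String)) (List (String × List String)))
  uniq.values

-- ===== PORT B =====
-- norm = list(dict.fromkeys(t for t in (str(tf).strip() for tf in tfs) if t))
def pvNormB (tfs : List String) : List String :=
  PySem.List.dedup ((tfs.map PySem.Str.strip).filter (fun t => t ≠ ""))

def pvAssignments : List (String × List String) → List (List (String × List String))
  | [] => [[]]
  | p :: rest =>
    let r := pvAssignments rest
    p.2.flatMap (fun tf => r.map (fun tail => (p.1, ([tf] : List String)) :: tail))

-- dict(pairs)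
def pvDictOf (l : List (String × List String)) : List (String × List String) :=
  (PySem.Dict.ofList l).items

def expand_indicator_timeframes_alt (selection : List (String × List String)) : List (List (String × List String)) :=
  let cleaned := selection.foldl (fun acc p =>
    if pvNormB p.2 ≠ [] then acc ++ [(p.1, pvNormB p.2)] else acc) []
  if cleaned = [] then [[]]
  else if cleaned.any (fun p => decide (1 < p.2.length)) then
    pvDictOf cleaned :: (pvAssignments cleaned).map pvDictOf
  else [pvDictOf cleaned]

-- ===== PRECONDITION & SPEC =====
-- Pre_ excludes association lists with duplicate keys: the Python argument is a dict, which cannot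
-- hold duplicate keys, so such lists correspond to no actual dict input (the dict constructor merges them).
def Pre_expand_indicator_timeframes (selection : List (String × List String)) : Prop :=
  (selection.map Prod.fst).Nodup
instance (selection : List (String × List String)) : Decidable (Pre_expand_indicator_timeframes selection) := by unfold Pre_expand_indicator_timeframes; infer_instance

def pvWitness_expand_indicator_timeframes : (List (String × List String)) :=
  [("a", ["x", "y"]), ("b", ["z"])]

def Spec_expand_indicator_timeframes (selection : List (String × List String)) (out : List (List (String × List String))) : Prop := out = expand_indicator_timeframes_alt selection
instance (selection : List (String × List String)) (out : List (List (String × List String))) : Decidable (Spec_expand_indicator_timeframes selection out) := by unfold Spec_expand_indicator_timeframes; infer_instance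

-- ===== CLAIM (what is proved, stated in full; the proofs are below) =====
def Claim_equal_expand_indicator_timeframes : Prop := ∀ (selection : List (String × List String)), Dom_expand_indicator_timeframes selection → Pre_expand_indicator_timeframes selection → Spec_expand_indicator_timeframes selection (expand_indicator_timeframes selection)

-- ===== LEMMAS AND PROOFS =====

-- the two normalizations agree
lemma pv_norm_filter : ∀ (l : List String) (acc : List String),
    l.foldl (fun n t => if t ≠ "" ∧ t ∉ n then n ++ [t] else n) acc
      = (l.filter (fun t => t ≠ "")).foldl PySem.Set.add acc := by
  intro l
  induction l with
  | nil => intro acc; rfl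
  | cons x xs ih =>
    intro acc
    by_cases hx : x = ""
    · subst hx; simp [List.foldl_cons, ih]
    · have hstep : (if x ≠ "" ∧ x ∉ acc then acc ++ [x] else acc) = PySem.Set.add acc x := by
        by_cases hm : x ∈ acc <;> simp [PySem.Set.add, hx, hm]
      rw [List.foldl_cons, ih, hstep,
        show List.filter (fun t => decide (t ≠ "")) (x :: xs)
            = x :: List.filter (fun t => decide (t ≠ "")) xs from by simp [hx],
        List.foldl_cons]

lemma pvNorm_eq (tfs : List String) : pvNormA tfs = pvNormB tfs := by
  unfold pvNormA pvNormB
  rw [← List.foldl_map (f := PySem.Str.strip)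
      (g := fun n t => if t ≠ "" ∧ t ∉ n then n ++ [t] else n)]
  rw [pv_norm_filter]
  rfl

-- an association list is determined by its key order and its multiset of entries
lemma pv_assoc_eq_of_perm : ∀ (l1 l2 : List (String × List String)),
    l1.map Prod.fst = l2.map Prod.fst → (l1.map Prod.fst).Nodup → l1.Perm l2 → l1 = l2 := by
  intro l1
  induction l1 with
  | nil => intro l2 hm _ _; simpa using (List.map_eq_nil_iff.mp hm.symm)
  | cons p t1 ih =>
    intro l2 hm hnd hp
    cases l2 with
    | nil => simp at hm
    | cons q t2 =>
      simp only [List.map_cons, List.cons.injEq] at hm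
      obtain ⟨hpq, hmt⟩ := hm
      simp only [List.map_cons, List.nodup_cons] at hnd
      have hpmem : p ∈ q :: t2 := hp.mem_iff.mp (List.mem_cons_self ..)
      have hpq' : p = q := by
        rcases List.mem_cons.mp hpmem with h | h
        · exact h
        · exfalso
          apply hnd.1
          have hmem : p.1 ∈ t2.map Prod.fst := List.mem_map_of_mem h
          rw [hmt]
          exact hmem
      subst hpq'
      have := ih t2 hmt hnd.2 (hp.cons_inv)
      rw [this]

-- A's product fold is B's recursion
lemma pv_foldl_prod_eq : ∀ (cl : List (String × List String)) (acc : List (List (String × List String))),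
    (cl.map (fun p => p.2.map (fun tf => (p.1, ([tf] : List String))))).foldl
        (fun acc pool => acc.flatMap (fun v => pool.map (fun c => v ++ [c]))) acc
      = acc.flatMap (fun v => (pvAssignments cl).map (v ++ ·)) := by
  intro cl
  induction cl with
  | nil => intro acc; simp [pvAssignments]
  | cons p rest ih =>
    intro acc
    simp only [List.map_cons, List.foldl_cons]
    rw [ih]
    simp only [pvAssignments, List.flatMap_map, List.map_flatMap, List.flatMap_assoc,
      List.map_map]
    congr 1
    funext v
    congr 1
    funext tf
    simp [Function.comp, List.append_assoc]

-- shape of an enumerated assignment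
lemma pv_mem_assignments : ∀ (cl : List (String × List String)) (v : List (String × List String)),
    v ∈ pvAssignments cl →
      v.map Prod.fst = cl.map Prod.fst ∧ ∀ q ∈ v, ∃ tf, q.2 = [tf] := by
  intro cl
  induction cl with
  | nil => intro v hv; simp [pvAssignments] at hv; subst hv; simp
  | cons p rest ih =>
    intro v hv
    simp only [pvAssignments, List.mem_flatMap, List.mem_map] at hv
    obtain ⟨tf, htf, tail, htail, rfl⟩ := hv
    obtain ⟨h1, h2⟩ := ih tail htail
    constructor
    · simp [h1]
    · intro q hq
      rcases List.mem_cons.mp hq with rfl | hq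
      · exact ⟨tf, rfl⟩
      · exact h2 q hq

lemma pv_nodup_assignments : ∀ (cl : List (String × List String)),
    (∀ p ∈ cl, p.2.Nodup) → (pvAssignments cl).Nodup := by
  intro cl
  induction cl with
  | nil => intro _; simp [pvAssignments]
  | cons p rest ih =>
    intro h
    have hr := ih (fun q hq => h q (List.mem_cons_of_mem _ hq))
    have hp2 : p.2.Nodup := h p (List.mem_cons_self ..)
    simp only [pvAssignments]
    have heq : p.2.flatMap (fun tf => (pvAssignments rest).map
          (fun tail => (p.1, ([tf] : List String)) :: tail))
        = (p.2 ×ˢ pvAssignments rest).map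
          (fun q => (p.1, ([q.1] : List String)) :: q.2) := by
      simp only [SProd.sprod, List.product, List.map_flatMap]
      simp [List.map_map, Function.comp_def]
    rw [heq]
    apply List.Nodup.map
    · intro a b hab
      simp only [List.cons.injEq, Prod.mk.injEq, List.cons.injEq] at hab
      exact Prod.ext (by simpa using hab.1.2) hab.2
    · exact List.Nodup.product hp2 hr

lemma pv_assignments_single : ∀ (cl : List (String × List String)),
    (∀ p ∈ cl, ∃ t, p.2 = [t]) → pvAssignments cl = [cl] := by
  intro cl
  induction cl with
  | nil => intro _; rfl
  | cons p rest ih =>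
    intro h
    obtain ⟨p1, p2⟩ := p
    obtain ⟨t, ht⟩ := h (p1, p2) (List.mem_cons_self ..)
    simp only at ht
    subst ht
    have := ih (fun q hq => h q (List.mem_cons_of_mem _ hq))
    simp [pvAssignments, this]

-- dict built from pairwise-distinct keys is the list itself
lemma pv_fold_insert_items (l : List (String × List String)) (h : (l.map Prod.fst).Nodup) :
    (l.foldl (fun d c => d.insert c.1 c.2)
      (PySem.Dict.empty : PySem.Dict String (List String))).items = l := by
  have := PySem.Dict.items_foldl_insert_fresh l Prod.fst Prod.snd PySem.Dict.empty
    (fun a _ => PySem.Dict.contains_empty _) h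
  simpa using this

lemma pv_pvDictOf_eq (l : List (String × List String)) (h : (l.map Prod.fst).Nodup) :
    pvDictOf l = l := by
  have heq : PySem.Dict.ofList l
      = l.foldl (fun d c => d.insert c.1 c.2) (PySem.Dict.empty : PySem.Dict String (List String)) := rfl
  rw [pvDictOf, heq, pv_fold_insert_items l h]

-- the dedup dict over pairwise-distinct keys returns its input
lemma pv_values_fold_key (combos : List (List (String × List String)))
    (h : (combos.map pvKey).Nodup) :
    (combos.foldl (fun u c => u.insert (pvKey c) c)
      (PySem.Dict.empty : PySem.Dict (List (String × List String)) (List (String × List String)))).values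
      = combos := by
  have := PySem.Dict.items_foldl_insert_fresh combos pvKey id PySem.Dict.empty
    (fun a _ => PySem.Dict.contains_empty _) h
  simp only [id_eq] at this
  simp only [PySem.Dict.values, this]
  simp [List.map_map, Function.comp_def, PySem.Dict.empty]

-- B's cleaned loop in closed form
lemma pv_cleanedB_eq (sel : List (String × List String)) :
    sel.foldl (fun acc p => if pvNormB p.2 ≠ [] then acc ++ [(p.1, pvNormB p.2)] else acc) []
      = ((sel.filter (fun x => decide (pvNormB x.2 ≠ []))).map (fun x => (x.1, pvNormB x.2))) := by
  have := PySem.List.foldl_append_if (fun x => decide (pvNormB x.2 ≠ []))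
    (fun x => (x.1, pvNormB x.2)) sel []
  simpa using this

-- A's cleaned dict lists exactly B's cleaned pairs
lemma pv_cleanedA_items (sel : List (String × List String)) (h : (sel.map Prod.fst).Nodup) :
    (sel.foldl (fun d p => if pvNormA p.2 ≠ [] then d.insert p.1 (pvNormA p.2) else d)
        (PySem.Dict.empty : PySem.Dict String (List String))).items
      = ((sel.filter (fun x => decide (pvNormB x.2 ≠ []))).map (fun x => (x.1, pvNormB x.2))) := by
  simp only [pvNorm_eq]
  have hf : sel.foldl (fun d p => if pvNormB p.2 ≠ [] then d.insert p.1 (pvNormB p.2) else d)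
        (PySem.Dict.empty : PySem.Dict String (List String))
      = (sel.filter (fun x => decide (pvNormB x.2 ≠ []))).foldl
        (fun d p => d.insert p.1 (pvNormB p.2)) PySem.Dict.empty := by
    rw [List.foldl_filter]
    simp
  rw [hf]
  have hsub : ((sel.filter (fun x => decide (pvNormB x.2 ≠ []))).map Prod.fst).Nodup :=
    ((List.filter_sublist).map Prod.fst).nodup h
  have := PySem.Dict.items_foldl_insert_fresh (sel.filter (fun x => decide (pvNormB x.2 ≠ [])))
    Prod.fst (fun p => pvNormB p.2) PySem.Dict.empty
    (fun a _ => PySem.Dict.contains_empty _) hsub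
  simpa using this

-- ===== VERDICT (by name: the statement is the Claim_ definition above) =====
theorem expand_indicator_timeframes_spec : Claim_equal_expand_indicator_timeframes := by
  intro sel _ hpre
  unfold Spec_expand_indicator_timeframes
  unfold Pre_expand_indicator_timeframes at hpre
  simp only [expand_indicator_timeframes, expand_indicator_timeframes_alt,
    pv_cleanedB_eq, pv_cleanedA_items sel hpre]
  set L := ((sel.filter (fun x => decide (pvNormB x.2 ≠ []))).map (fun x => (x.1, pvNormB x.2))) with hL
  have hLfst : L.map Prod.fst = (sel.filter (fun x => decide (pvNormB x.2 ≠ []))).map Prod.fst := by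
    simp [hL, List.map_map, Function.comp_def]
  have hLnd : (L.map Prod.fst).Nodup := by
    rw [hLfst]
    exact ((List.filter_sublist).map Prod.fst).nodup hpre
  by_cases hsel : sel = []
  · subst hsel
    simp [hL]
  · simp only [hsel, if_false]
    by_cases hLe : L = []
    · simp [hLe]
    · simp only [hLe, if_false]
      -- the product fold equals the recursive enumeration
      have hvar : (L.map (fun p => p.2.map (fun tf => (p.1, ([tf] : List String))))).foldl
            (fun acc pool => acc.flatMap (fun v => pool.map (fun c => v ++ [c]))) [[]]
          = pvAssignments L := by
        rw [pv_foldl_prod_eq L [[]]]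
        simp
      rw [hvar]
      -- the combos loop appends the enumerated dicts
      rw [PySem.List.foldl_append_singleton_eq_map
        (fun v => (v.foldl (fun d c => d.insert c.1 c.2)
          (PySem.Dict.empty : PySem.Dict String (List String))).items) (pvAssignments L) [L]]
      have hmapid : (pvAssignments L).map (fun v => (v.foldl (fun d c => d.insert c.1 c.2)
            (PySem.Dict.empty : PySem.Dict String (List String))).items) = pvAssignments L := by
        conv_rhs => rw [← List.map_id (pvAssignments L)]
        apply List.map_congr_left
        intro v hv
        simpa using pv_fold_insert_items v (((pv_mem_assignments L v hv).1).symm ▸ hLnd)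
      rw [hmapid]
      -- elements of L: values are nonempty deduped lists
      have hLval : ∀ p ∈ L, p.2.Nodup ∧ p.2 ≠ [] := by
        intro p hp
        simp only [hL, List.mem_map, List.mem_filter] at hp
        obtain ⟨x, ⟨_, hxne⟩, rfl⟩ := hp
        exact ⟨PySem.List.nodup_dedup _, by simpa using hxne⟩
      by_cases hany : L.any (fun p => decide (1 < p.2.length))
      · -- some indicator has ≥ 2 timeframes: no duplicate arises, A's dedup is the identity
        simp only [hany, if_true]
        obtain ⟨p0, hp0L, hp0len⟩ := List.any_eq_true.mp hany
        have hp0len' : 1 < p0.2.length := of_decide_eq_true hp0len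
        have hperm_of_key : ∀ v ∈ pvAssignments L, pvKey v = pvKey L → L.Perm v := by
          intro v hv hk
          have h1 := PySem.List.sorted2_perm L Prod.fst Prod.snd false
          have h2 := PySem.List.sorted2_perm v Prod.fst Prod.snd false
          unfold pvKey at hk
          rw [hk] at h2
          exact h1.symm.trans h2
        have hnotmem : pvKey L ∉ (pvAssignments L).map pvKey := by
          intro hmem
          obtain ⟨v, hv, hkv⟩ := List.mem_map.mp hmem
          have hperm := hperm_of_key v hv hkv
          have hp0v : p0 ∈ v := hperm.mem_iff.mp hp0L
          obtain ⟨tf, htf⟩ := (pv_mem_assignments L v hv).2 p0 hp0v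
          rw [htf] at hp0len'
          simp at hp0len'
        have hinj : ∀ v1 ∈ pvAssignments L, ∀ v2 ∈ pvAssignments L, pvKey v1 = pvKey v2 → v1 = v2 := by
          intro v1 h1 v2 h2 hk
          have q1 := PySem.List.sorted2_perm v1 Prod.fst Prod.snd false
          have q2 := PySem.List.sorted2_perm v2 Prod.fst Prod.snd false
          unfold pvKey at hk
          rw [hk] at q1
          have hperm : v1.Perm v2 := q1.symm.trans q2
          exact pv_assoc_eq_of_perm v1 v2
            ((pv_mem_assignments L v1 h1).1.trans (pv_mem_assignments L v2 h2).1.symm)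
            (((pv_mem_assignments L v1 h1).1).symm ▸ hLnd) hperm
        have hkeys : (((L :: pvAssignments L)).map pvKey).Nodup := by
          simp only [List.map_cons, List.nodup_cons]
          exact ⟨hnotmem, (pv_nodup_assignments L (fun p hp => (hLval p hp).1)).map_on hinj⟩
        rw [show ([L] ++ pvAssignments L) = L :: pvAssignments L from rfl,
          pv_values_fold_key (L :: pvAssignments L) hkeys]
        congr 1
        · exact (pv_pvDictOf_eq L hLnd).symm
        · symm
          conv_rhs => rw [← List.map_id (pvAssignments L)]
          apply List.map_congr_left
          intro v hv
          simpa using pv_pvDictOf_eq v (((pv_mem_assignments L v hv).1).symm ▸ hLnd)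
      · -- every indicator has exactly one timeframe: the enumeration repeats cleaned once
        simp only [hany]
        have hsingle : ∀ p ∈ L, ∃ t, p.2 = [t] := by
          intro p hp
          have hle : ¬ 1 < p.2.length := by
            intro hgt
            exact hany (List.any_eq_true.mpr ⟨p, hp, by simpa using hgt⟩)
          obtain ⟨hnd, hne⟩ := hLval p hp
          match hp2 : p.2 with
          | [] => exact absurd hp2 hne
          | [t] => exact ⟨t, rfl⟩
          | a :: b :: r => rw [hp2] at hle; simp at hle
        rw [pv_assignments_single L hsingle]
        rw [show ([L] ++ [L]) = [L, L] from rfl]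
        simp only [List.foldl_cons, List.foldl_nil, PySem.Dict.insert_insert_self]
        rw [show (PySem.Dict.empty.insert (pvKey L) L).values
            = ((PySem.Dict.empty.insert (pvKey L) L).items).map (·.2) from rfl]
        rw [PySem.Dict.items_insert_of_not_contains _ _ (PySem.Dict.contains_empty _)]
        simp [PySem.Dict.empty, pv_pvDictOf_eq L hLnd]
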